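-- pv_equiv track=rewrite | github.com/q734738781/CatMaster | catmaster/runtime/whiteboard_ops.py | _section_bounds
-- ===== SOURCE A (Python) =====
-- from typing import Any, Dict, List, Optional, Tuple
--
-- TARGET_SECTIONS = {"Goal", "Key Facts", "Key Files", "Constraints", "Open Questions", "Journal"}
--
-- def _section_bounds(lines: List[str]) -> Dict[str, Tuple[int, int]]:
--     headers: List[Tuple[str, int]] = []
--     for idx, line in enumerate(lines):
--         if line.startswith("### "):
--             name = line[4:].strip()
--         elif line.startswith("## "):
--             name = line[3:].strip()
--         else:
--             continue
--         if name in TARGET_SECTIONS: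
--             headers.append((name, idx))
--     headers.sort(key=lambda item: item[1])
--     bounds: Dict[str, Tuple[int, int]] = {}
--     for i, (name, start) in enumerate(headers):
--         end = headers[i + 1][1] if i + 1 < len(headers) else len(lines)
--         bounds[name] = (start, end)
--     return bounds
-- ===== SOURCE B (Python) =====
-- TARGET_SECTIONS = {"Goal", "Key Facts", "Key Files", "Constraints", "Open Questions", "Journal"}
--
-- def _section_bounds(lines):
--     bounds = {}
--     prev_name = None
--     prev_start = 0
--     for idx, line in enumerate(lines):
--         if line.startswith("### "):
--             name = line[4:].strip()
--         elif line.startswith("## "):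
--             name = line[3:].strip()
--         else:
--             continue
--         if name in TARGET_SECTIONS:
--             if prev_name is not None:
--                 bounds[prev_name] = (prev_start, idx)
--             prev_name, prev_start = name, idx
--     if prev_name is not None:
--         bounds[prev_name] = (prev_start, len(lines))
--     return bounds
-- ===== Notes on version B (the rewrite author's own statement) =====
-- stated objective: simpler
-- what changed: Single linear pass that closes the currently-open section when the next target header appears, instead of collecting all headers into a list, sorting it, and re-scanning with index lookups.
import Mathlib
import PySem

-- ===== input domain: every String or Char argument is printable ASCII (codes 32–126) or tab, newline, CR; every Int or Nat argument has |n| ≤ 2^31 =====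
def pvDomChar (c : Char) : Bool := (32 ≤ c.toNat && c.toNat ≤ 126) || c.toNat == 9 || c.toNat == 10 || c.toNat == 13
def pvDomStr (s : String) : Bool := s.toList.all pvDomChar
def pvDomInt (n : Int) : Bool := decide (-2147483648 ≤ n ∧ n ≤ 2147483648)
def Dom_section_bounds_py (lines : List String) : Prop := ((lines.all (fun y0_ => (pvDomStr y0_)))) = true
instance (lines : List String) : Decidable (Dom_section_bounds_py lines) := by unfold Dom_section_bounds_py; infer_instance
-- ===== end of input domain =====

-- B is a single linear pass that closes the currently-open section at each new target
-- header, instead of collecting+sorting all headers and re-scanning with index lookups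
-- (objective: simpler).

-- ===== PORT A =====
-- TARGET_SECTIONS (membership test only, so a list of the distinct literals is exact)
def pvTargets : List String :=
  ["Goal", "Key Facts", "Key Files", "Constraints", "Open Questions", "Journal"]

-- the shared `### `/`## ` prefix detection (identical code in A and B)
def pvHeaderName? (line : String) : Option String :=
  if PySem.Str.startswith line "### " then
    some (PySem.Str.strip (PySem.Str.slice line (some 4) none))
  else if PySem.Str.startswith line "## " then
    some (PySem.Str.strip (PySem.Str.slice line (some 3) none))
  else none

def section_bounds_py (lines : List String) : List (String × Int × Int) :=
  let headers : List (String × Int) :=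
    (PySem.List.enumerate lines).foldl
      (fun acc p =>
        match pvHeaderName? p.2 with
        | some name => if name ∈ pvTargets then acc ++ [(name, p.1)] else acc
        | none => acc) []
  let headers := PySem.List.sorted headers (fun it => it.2) false
  let bounds : PySem.Dict String (Int × Int) :=
    (PySem.List.enumerate headers).foldl
      (fun d p =>
        let e : Int :=
          match PySem.List.pyGet? headers (p.1 + 1) with
          | some h => h.2
          | none => (lines.length : Int)
        d.insert p.2.1 (p.2.2, e)) PySem.Dict.empty
  bounds.items

-- ===== PORT B =====
def section_bounds_py_alt (lines : List String) : List (String × Int × Int) :=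
  let st : PySem.Dict String (Int × Int) × Option (String × Int) :=
    (PySem.List.enumerate lines).foldl
      (fun st p =>
        match pvHeaderName? p.2 with
        | some name =>
            if name ∈ pvTargets then
              match st.2 with
              | some pv => (st.1.insert pv.1 (pv.2, p.1), some (name, p.1))
              | none => (st.1, some (name, p.1))
            else st
        | none => st) (PySem.Dict.empty, none)
  (match st.2 with
   | some pv => st.1.insert pv.1 (pv.2, (lines.length : Int))
   | none => st.1).items

-- ===== PRECONDITION & SPEC =====
def Spec_section_bounds_py (lines : List String) (out : List (String × Int × Int)) : Prop := out = section_bounds_py_alt lines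
instance (lines : List String) (out : List (String × Int × Int)) : Decidable (Spec_section_bounds_py lines out) := by unfold Spec_section_bounds_py; infer_instance

-- ===== CLAIM (what is proved, stated in full; the proofs are below) =====
def Claim_equal_section_bounds_py : Prop := ∀ (lines : List String), Dom_section_bounds_py lines → Spec_section_bounds_py lines (section_bounds_py lines)

-- ===== LEMMAS AND PROOFS =====

-- the per-line header contribution: [] or one (name, idx) pair
def pvHdr (p : Int × String) : List (String × Int) :=
  match pvHeaderName? p.2 with
  | some name => if name ∈ pvTargets then [(name, p.1)] else []
  | none => []

-- the (name, start, end) triples that both programs insert, in order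
def pvPairs : List (String × Int) → Int → List (String × (Int × Int))
  | [], _ => []
  | (a, s) :: t, n =>
      (a, (s, match t with | [] => n | (_, u) :: _ => u)) :: pvPairs t n

theorem pvHdrs_eq_flatMap (lines : List String) :
    (PySem.List.enumerate lines).foldl
      (fun acc p =>
        match pvHeaderName? p.2 with
        | some name => if name ∈ pvTargets then acc ++ [(name, p.1)] else acc
        | none => acc) []
      = (PySem.List.enumerate lines).flatMap pvHdr := by
  have h : ∀ (l : List (Int × String)) (acc : List (String × Int)),
      l.foldl (fun acc p =>
        match pvHeaderName? p.2 with
        | some name => if name ∈ pvTargets then acc ++ [(name, p.1)] else acc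
        | none => acc) acc = acc ++ l.flatMap pvHdr := by
    intro l
    induction l with
    | nil => intro acc; simp
    | cons x xs ih =>
        intro acc
        simp only [List.foldl_cons, List.flatMap_cons, ih]
        unfold pvHdr
        cases pvHeaderName? x.2 with
        | none => simp
        | some name => by_cases hm : name ∈ pvTargets <;> simp [hm]
  simpa using h (PySem.List.enumerate lines) []

def pvNext (t : List (String × Int)) (n : Int) : Int :=
  match t with | [] => n | (_, u) :: _ => u

theorem pvPairs_cons (a : String) (s : Int) (t : List (String × Int)) (n : Int) :
    pvPairs ((a, s) :: t) n = (a, (s, pvNext t n)) :: pvPairs t n := by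
  cases t with
  | nil => rfl
  | cons h2 t2 => obtain ⟨b, u⟩ := h2; rfl

theorem pvHdrs_pairwise_aux :
    ∀ (l : List (Int × String)), l.Pairwise (fun p q => p.1 < q.1) →
      (l.flatMap pvHdr).Pairwise (fun a b => a.2 < b.2) := by
  have hsnd : ∀ (p : Int × String) (x : String × Int), x ∈ pvHdr p → x.2 = p.1 := by
    intro p x hx
    unfold pvHdr at hx
    cases h : pvHeaderName? p.2 with
    | none => simp [h] at hx
    | some name =>
        simp only [h] at hx
        by_cases hm : name ∈ pvTargets <;> simp [hm] at hx
        subst hx; rfl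
  intro l
  induction l with
  | nil => intro _; simp
  | cons p l ih =>
      intro hp
      obtain ⟨hrel, htail⟩ := List.pairwise_cons.1 hp
      simp only [List.flatMap_cons]
      apply List.pairwise_append.2
      refine ⟨?_, ih htail, ?_⟩
      · -- pvHdr p has at most one element
        unfold pvHdr
        cases pvHeaderName? p.2 with
        | none => simp
        | some name => by_cases hm : name ∈ pvTargets <;> simp [hm]
      · intro x hx y hy
        have hxp := hsnd p x hx
        obtain ⟨q, hq, hyq⟩ := List.mem_flatMap.1 hy
        have hyq2 := hsnd q y hyq
        have := hrel q hq
        omega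

theorem pvHdrs_pairwise (lines : List String) :
    ((PySem.List.enumerate lines).flatMap pvHdr).Pairwise (fun a b => a.2 < b.2) :=
  pvHdrs_pairwise_aux _ (PySem.List.pairwise_lt_enumerate (xs := lines) (s := 0))

-- A's indexed second loop, started at any split of the header list, inserts pvPairs
theorem pvA_loop (n : Int) :
    ∀ (t pre : List (String × Int)) (d : PySem.Dict String (Int × Int)),
      (PySem.List.enumerate t (pre.length : Int)).foldl
        (fun d p =>
          let e : Int :=
            match PySem.List.pyGet? (pre ++ t) (p.1 + 1) with
            | some h => h.2
            | none => n
          d.insert p.2.1 (p.2.2, e)) d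
        = (pvPairs t n).foldl (fun d q => d.insert q.1 q.2) d := by
  intro t
  induction t with
  | nil => intro pre d; simp [pvPairs]
  | cons hd tl ih =>
      intro pre d
      obtain ⟨a, s⟩ := hd
      rw [PySem.List.enumerate_cons]
      simp only [List.foldl_cons]
      have hidx : PySem.List.pyGet? (pre ++ (a, s) :: tl) ((pre.length : Int) + 1)
          = tl[0]? := by
        have h1 : ((pre.length : Int) + 1) = ((pre.length + 1 : Nat) : Int) := by push_cast; ring
        rw [h1, PySem.List.pyGet?_natCast]
        rw [List.getElem?_append_right (by omega)]
        simp
      have hacc : (d.insert a (s,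
          match PySem.List.pyGet? (pre ++ (a, s) :: tl) ((pre.length : Int) + 1) with
          | some h => h.2 | none => n)) = d.insert a (s, pvNext tl n) := by
        rw [hidx]
        cases tl with
        | nil => rfl
        | cons h2 t2 => obtain ⟨b, u⟩ := h2; rfl
      rw [hacc, pvPairs_cons]
      simp only [List.foldl_cons]
      have hlen : ((pre.length : Int) + 1) = (((pre ++ [(a, s)]).length : Nat) : Int) := by
        simp
      have hre : pre ++ (a, s) :: tl = (pre ++ [(a, s)]) ++ tl := by simp
      rw [hlen, hre]
      exact ih (pre ++ [(a, s)]) _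

-- B's step on the reduced header stream
def pvStepB (st : PySem.Dict String (Int × Int) × Option (String × Int))
    (h : String × Int) : PySem.Dict String (Int × Int) × Option (String × Int) :=
  match st.2 with
  | some pv => (st.1.insert pv.1 (pv.2, h.2), some h)
  | none => (st.1, some h)

def pvFin (n : Int) (st : PySem.Dict String (Int × Int) × Option (String × Int)) :
    PySem.Dict String (Int × Int) :=
  match st.2 with
  | some pv => st.1.insert pv.1 (pv.2, n)
  | none => st.1

theorem pv_foldl_flatMap :
    ∀ (l : List (Int × String)) (st : PySem.Dict String (Int × Int) × Option (String × Int)),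
      l.foldl (fun st p => (pvHdr p).foldl pvStepB st) st
        = (l.flatMap pvHdr).foldl pvStepB st := by
  intro l
  induction l with
  | nil => intro st; rfl
  | cons x xs ih =>
      intro st
      simp only [List.foldl_cons, List.flatMap_cons, List.foldl_append]
      exact ih _

theorem pvB_fold_eq (lines : List String)
    (st : PySem.Dict String (Int × Int) × Option (String × Int)) :
    (PySem.List.enumerate lines).foldl
      (fun st p =>
        match pvHeaderName? p.2 with
        | some name =>
            if name ∈ pvTargets then
              match st.2 with
              | some pv => (st.1.insert pv.1 (pv.2, p.1), some (name, p.1))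
              | none => (st.1, some (name, p.1))
            else st
        | none => st) st
      = ((PySem.List.enumerate lines).flatMap pvHdr).foldl pvStepB st := by
  have hbody : (fun (st : PySem.Dict String (Int × Int) × Option (String × Int))
      (p : Int × String) =>
      (match pvHeaderName? p.2 with
        | some name =>
            if name ∈ pvTargets then
              match st.2 with
              | some pv => (st.1.insert pv.1 (pv.2, p.1), some (name, p.1))
              | none => (st.1, some (name, p.1))
            else st
        | none => st))
      = (fun st p => (pvHdr p).foldl pvStepB st) := by
    funext st p
    unfold pvHdr
    cases pvHeaderName? p.2 with
    | none => rfl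
    | some name =>
        by_cases hm : name ∈ pvTargets
        · simp only [hm, if_pos, List.foldl_cons, List.foldl_nil]
          cases h2 : st.2 <;> simp [pvStepB, h2]
        · simp [hm]
  rw [hbody, pv_foldl_flatMap]

theorem pvB_closes (n : Int) :
    ∀ (t : List (String × Int)) (d : PySem.Dict String (Int × Int)) (pv : String × Int),
      pvFin n (t.foldl pvStepB (d, some pv))
        = (pvPairs (pv :: t) n).foldl (fun d q => d.insert q.1 q.2) d := by
  intro t
  induction t with
  | nil => intro d pv; obtain ⟨a, s⟩ := pv; simp [pvFin, pvPairs]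
  | cons hd tl ih =>
      intro d pv
      obtain ⟨a, s⟩ := pv; obtain ⟨b, u⟩ := hd
      simp only [List.foldl_cons]
      have h1 : pvStepB (d, some (a, s)) (b, u) = (d.insert a (s, u), some (b, u)) := rfl
      rw [h1, ih, pvPairs_cons a s ((b, u) :: tl) n]
      simp only [List.foldl_cons, pvNext]

theorem pvB_fin_eq (n : Int) (t : List (String × Int)) :
    pvFin n (t.foldl pvStepB (PySem.Dict.empty, none))
      = (pvPairs t n).foldl (fun d q => d.insert q.1 q.2) PySem.Dict.empty := by
  cases t with
  | nil => rfl
  | cons hd tl =>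
      simp only [List.foldl_cons]
      have h1 : pvStepB ((PySem.Dict.empty : PySem.Dict String (Int × Int)), none) hd
          = (PySem.Dict.empty, some hd) := rfl
      rw [h1]
      exact pvB_closes n tl _ hd

-- ===== VERDICT (by name: the statement is the Claim_ definition above) =====
theorem section_bounds_py_spec : Claim_equal_section_bounds_py := by
  intro lines _
  unfold Spec_section_bounds_py section_bounds_py section_bounds_py_alt
  simp only []
  set H := (PySem.List.enumerate lines).flatMap pvHdr with hH
  rw [pvHdrs_eq_flatMap lines, ← hH]
  have hsorted : PySem.List.sorted H (fun it => it.2) false = H :=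
    PySem.List.sorted_eq_self_of_pairwise H (fun it => it.2)
      ((pvHdrs_pairwise lines).imp (fun h => le_of_lt h))
  rw [hsorted]
  rw [pvB_fold_eq lines, ← hH]
  have hA := pvA_loop (lines.length : Int) H [] PySem.Dict.empty
  simp only [List.nil_append, List.length_nil, Nat.cast_zero] at hA
  rw [hA, ← pvB_fin_eq (lines.length : Int) H]
  rfl
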